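-- pv_equiv track=rewrite | github.com/django/django | venv/lib/python3.11/site-packages/docutils/utils/__init__.py | escape2null
-- ===== SOURCE A (Python) =====
-- def escape2null(text):
--     """Return a string with escape-backslashes converted to nulls."""
--     parts = []
--     start = 0
--     while True:
--         found = text.find('\\', start)
--         if found == -1:
--             parts.append(text[start:])
--             return ''.join(parts)
--         parts.append(text[start:found])
--         parts.append('\x00' + text[found+1:found+2])
--         start = found + 2               # skip character after escape
-- ===== SOURCE B (Python) =====
-- def escape2null(text):
--     """Return a string with escape-backslashes converted to nulls."""
--     result = []
--     escaped = False
--     for ch in text: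
--         if escaped:
--             result.append(ch)
--             escaped = False
--         elif ch == '\\':
--             result.append('\x00')
--             escaped = True
--         else:
--             result.append(ch)
--     return ''.join(result)
-- ===== Notes on version B (the rewrite author's own statement) =====
-- stated objective: alternative
-- what changed: Replaced find/slice chunk-jumping with a single character-by-character pass that maintains a boolean escape-pending state.
import Mathlib
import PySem

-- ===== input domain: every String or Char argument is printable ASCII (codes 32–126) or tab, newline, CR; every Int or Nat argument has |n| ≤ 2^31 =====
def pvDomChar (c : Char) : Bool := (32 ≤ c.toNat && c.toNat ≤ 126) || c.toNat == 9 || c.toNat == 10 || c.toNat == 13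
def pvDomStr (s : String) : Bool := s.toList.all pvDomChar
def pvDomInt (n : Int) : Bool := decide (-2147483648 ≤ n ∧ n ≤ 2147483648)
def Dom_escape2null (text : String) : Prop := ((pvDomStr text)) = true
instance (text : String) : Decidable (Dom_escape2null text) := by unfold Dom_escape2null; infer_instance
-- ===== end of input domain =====

-- B replaces A's find/slice chunk-jumping with a one-pass character state machine (same cost; alternative decomposition).

-- ===== PORT A =====
-- the while-loop of A: parts is the accumulated list of string pieces, start the scan position
-- (Python's `start` is an int that stays ≥ 0, kept as Nat; `fuel` only bounds the iteration count
-- so the recursion is structural — it is always large enough, see loop_eq below)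
def escape2nullLoop (cs : List Char) : Nat → List (List Char) → Nat → List Char
  | 0, _, _ => []
  | fuel + 1, parts, start =>
      let found := PySem.Chars.findFrom cs ['\\'] (start : Int) none
      if found = -1 then
        (parts ++ [PySem.List.slice cs (some (start : Int)) none]).flatten
      else
        escape2nullLoop cs fuel
          (parts ++ [PySem.List.slice cs (some (start : Int)) (some found),
                     '\u0000' :: PySem.List.slice cs (some (found + 1)) (some (found + 2))])
          (found.toNat + 2)

def escape2null (text : String) : String :=
  String.ofList (escape2nullLoop text.toList (text.toList.length + 2) [] 0)

-- ===== PORT B =====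
-- the for-loop of B: `escaped` is the state flag; output built char by char
def escape2nullGo : List Char → Bool → List Char
  | [], _ => []
  | c :: cs, true => c :: escape2nullGo cs false
  | c :: cs, false =>
      if c = '\\' then '\u0000' :: escape2nullGo cs true else c :: escape2nullGo cs false

def escape2null_alt (text : String) : String := String.ofList (escape2nullGo text.toList false)

-- ===== PRECONDITION & SPEC =====
def Spec_escape2null (text : String) (out : String) : Prop := out = escape2null_alt text
instance (text : String) (out : String) : Decidable (Spec_escape2null text out) := by unfold Spec_escape2null; infer_instance

-- ===== CLAIM (what is proved, stated in full; the proofs are below) =====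
def Claim_equal_escape2null : Prop := ∀ (text : String), Dom_escape2null text → Spec_escape2null text (escape2null text)

-- ===== LEMMAS AND PROOFS =====

theorem pvFindFrom_bounds (cs sub : List Char) (k : Nat)
    (h : PySem.Chars.findFrom cs sub (k : Int) none ≠ -1) :
    (k : Int) ≤ PySem.Chars.findFrom cs sub (k : Int) none ∧
      PySem.Chars.findFrom cs sub (k : Int) none ≤ (cs.length : Int) := by
  unfold PySem.Chars.findFrom at *
  simp only [Int.toNat_natCast, List.take_length] at *
  have h3 := PySem.Chars.neg_one_le_find (List.drop k cs) sub
  have h4 := PySem.Chars.find_le_length (List.drop k cs) sub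
  simp only [List.length_drop] at h4
  split_ifs at *
  all_goals try simp only [Int.toNat_natCast] at *
  all_goals omega

theorem go_no_bs (s : List Char) (h : '\\' ∉ s) : escape2nullGo s false = s := by
  induction s with
  | nil => rfl
  | cons c t ih =>
      simp only [List.mem_cons, not_or] at h
      have hc : ¬ c = '\\' := fun e => h.1 e.symm
      simp [escape2nullGo, hc, ih h.2]

theorem go_append_no_bs (p s : List Char) (h : '\\' ∉ p) :
    escape2nullGo (p ++ s) false = p ++ escape2nullGo s false := by
  induction p with
  | nil => rfl
  | cons c t ih =>
      simp only [List.mem_cons, not_or] at h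
      have hc : ¬ c = '\\' := fun e => h.1 e.symm
      simp [escape2nullGo, hc, ih h.2]

theorem go_true_eq (s : List Char) :
    escape2nullGo s true = s.take 1 ++ escape2nullGo (s.drop 1) false := by
  cases s <;> simp [escape2nullGo]

theorem loop_eq (cs : List Char) (fuel : Nat) :
    ∀ (parts : List (List Char)) (start : Nat), start ≤ cs.length + 1 →
      cs.length + 2 ≤ fuel + start →
      escape2nullLoop cs fuel parts start = parts.flatten ++ escape2nullGo (cs.drop start) false := by
  induction fuel with
  | zero => intro parts start hst hfuel; omega
  | succ fuel ih =>
      intro p st hst hfuel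
      rw [escape2nullLoop]
      by_cases hfd : PySem.Chars.findFrom cs ['\\'] (st : Int) none = -1
      · rw [if_pos hfd]
        have hnb : '\\' ∉ cs.drop st := by
          by_cases hs : st ≤ cs.length
          · intro hm
            have hinf : (['\\'] : List Char) <:+: cs.drop st := by
              obtain ⟨u, v, huv⟩ := List.append_of_mem hm
              exact ⟨u, v, by simp [huv]⟩
            exact ((PySem.Chars.findFrom_natCast_eq_neg_one_iff cs ['\\'] st hs).mp hfd) hinf
          · have hd : cs.drop st = [] := List.drop_eq_nil_of_le (by omega)
            simp [hd]
        rw [PySem.List.slice_from _ (Int.natCast_nonneg st)]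
        rw [go_no_bs _ hnb]
        simp
      · rw [if_neg hfd]
        have hb := pvFindFrom_bounds cs ['\\'] st hfd
        have hsl : st ≤ cs.length := by exact_mod_cast hb.1.trans hb.2
        have hq0 : 0 ≤ PySem.Chars.find (cs.drop st) ['\\'] := by
          have h1 := PySem.Chars.neg_one_le_find (cs.drop st) ['\\']
          rcases eq_or_ne (PySem.Chars.find (cs.drop st) ['\\']) (-1) with h | h
          · exact absurd (by rw [PySem.Chars.findFrom_natCast cs ['\\'] st hsl]; simp [h]) hfd
          · omega
        have hcq : PySem.Chars.findFrom cs ['\\'] (st : Int) none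
            = (st : Int) + PySem.Chars.find (cs.drop st) ['\\'] := by
          rw [PySem.Chars.findFrom_natCast cs ['\\'] st hsl]
          have : PySem.Chars.find (cs.drop st) ['\\'] ≠ -1 := by omega
          simp [this]
        obtain ⟨hpre, hmin⟩ := PySem.Chars.find_spec (s := cs.drop st) (sub := ['\\']) hq0
        obtain ⟨t, ht⟩ := hpre
        set r := (PySem.Chars.find (cs.drop st) ['\\']).toNat with hrdef
        have hrlen : r < (cs.drop st).length := by
          have hl := List.IsPrefix.length_le ⟨t, ht⟩
          simp [List.length_drop] at hl ⊢
          omega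
        have htd : t = (cs.drop st).drop (r + 1) := by
          have h1 : ((cs.drop st).drop r).tail = t := by rw [← ht]; rfl
          rw [← h1, List.tail_drop]
        have hdec : cs.drop st = (cs.drop st).take r ++ '\\' :: (cs.drop st).drop (r + 1) := by
          conv_lhs => rw [← List.take_append_drop r (cs.drop st), ← ht, htd]
          rfl
        have hsl1 : PySem.List.slice cs (some (st : Int))
            (some (PySem.Chars.findFrom cs ['\\'] (st : Int) none)) = (cs.drop st).take r := by
          rw [hcq, PySem.List.slice_toNat cs (Int.natCast_nonneg st) (by omega)]
          simp only [Int.toNat_natCast]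
          congr 1
          omega
        have hsl2 : PySem.List.slice cs (some (PySem.Chars.findFrom cs ['\\'] (st : Int) none + 1))
            (some (PySem.Chars.findFrom cs ['\\'] (st : Int) none + 2))
            = ((cs.drop st).drop (r + 1)).take 1 := by
          rw [hcq, PySem.List.slice_toNat cs (by omega) (by omega), List.drop_drop]
          have e1 : ((st : Int) + PySem.Chars.find (cs.drop st) ['\\'] + 2).toNat
              - ((st : Int) + PySem.Chars.find (cs.drop st) ['\\'] + 1).toNat = 1 := by omega
          have e2 : ((st : Int) + PySem.Chars.find (cs.drop st) ['\\'] + 1).toNat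
              = st + (r + 1) := by omega
          rw [e1, e2]
        have hfn : (PySem.Chars.findFrom cs ['\\'] (st : Int) none).toNat = st + r := by omega
        have hdrop2 : cs.drop ((PySem.Chars.findFrom cs ['\\'] (st : Int) none).toNat + 2)
            = (cs.drop st).drop (r + 2) := by
          rw [List.drop_drop]
          congr 1
          omega
        have hnb : '\\' ∉ (cs.drop st).take r := by
          intro hm
          obtain ⟨i, hi, he⟩ := List.mem_iff_getElem.mp hm
          rw [List.length_take] at hi
          have hir : i < r := lt_of_lt_of_le hi (min_le_left _ _)
          have hil : i < (cs.drop st).length := lt_of_lt_of_le hi (min_le_right _ _)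
          apply hmin i hir
          rw [List.drop_eq_getElem_cons hil]
          have hgi : (cs.drop st)[i] = '\\' := by
            rw [← he]; simp
          rw [hgi]
          exact ⟨_, rfl⟩
        have hlen : (cs.drop st).length = cs.length - st := List.length_drop ..
        rw [ih _ ((PySem.Chars.findFrom cs ['\\'] (st : Int) none).toNat + 2)
              (by omega) (by omega)]
        rw [hsl1, hsl2, hdrop2]
        conv_rhs => rw [hdec]
        rw [go_append_no_bs _ _ hnb]
        have efin : st + (r + 2) = st + (r + 1) + 1 := by omega
        simp [escape2nullGo, go_true_eq, List.drop_drop, efin]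

-- ===== VERDICT (by name: the statement is the Claim_ definition above) =====
theorem escape2null_spec : Claim_equal_escape2null := by
  intro text _
  unfold Spec_escape2null escape2null escape2null_alt
  rw [loop_eq text.toList (text.toList.length + 2) [] 0 (by omega) (by omega)]
  simp
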